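-- pv_equiv track=rewrite | github.com/Siyuan-Zou/CSE337 | Python/Basic Python/q5.py | notEnoughUniqueChar
-- ===== SOURCE A (Python) =====
-- def notEnoughUniqueChar(s):
--     c = list()
--     i = 0
--     while i < len(s):
--         if s[i] not in c:
--             c.append(s[i])
--         i+=1
--     if len(c) < len(s)/2:
--         return True
--     return False
-- ===== SOURCE B (Python) =====
-- def notEnoughUniqueChar(s):
--     t = sorted(s)
--     count = 0
--     prev = None
--     for ch in t:
--         if prev is None or ch != prev:
--             count += 1
--         prev = ch
--     return count < len(s) / 2
-- ===== Notes on version B (the rewrite author's own statement) =====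
-- stated objective: faster
-- what changed: Counts distinct characters by sorting and counting adjacent boundaries in one pass instead of a membership scan over a growing list for every character.
import Mathlib
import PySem

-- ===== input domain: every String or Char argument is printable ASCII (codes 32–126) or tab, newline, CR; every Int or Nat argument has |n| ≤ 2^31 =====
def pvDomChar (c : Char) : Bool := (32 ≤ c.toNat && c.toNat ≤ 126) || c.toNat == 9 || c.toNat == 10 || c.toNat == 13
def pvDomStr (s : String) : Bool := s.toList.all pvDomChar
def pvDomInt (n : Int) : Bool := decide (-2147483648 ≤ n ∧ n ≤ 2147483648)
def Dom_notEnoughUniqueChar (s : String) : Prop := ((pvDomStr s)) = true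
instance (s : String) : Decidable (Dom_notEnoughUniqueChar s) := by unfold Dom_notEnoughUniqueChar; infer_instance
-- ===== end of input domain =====

-- B replaces A's per-character membership scan over a growing list by sort-then-count-adjacent-boundaries.
-- Both Pythons compare an int count against len(s)/2 (float): for nonnegative ints this is exactly 2*count < len(s),
-- which is how both ports render the comparison.

-- ===== PORT A =====
-- while loop over indices appending unseen characters to c, then len(c) < len(s)/2
def notEnoughUniqueChar (s : String) : Bool :=
  let c := s.toList.foldl (fun c ch => if ch ∈ c then c else c ++ [ch]) []
  decide (2 * c.length < s.toList.length)

-- ===== PORT B =====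
-- sort the characters, then one pass counting positions where the character differs from the previous one
def notEnoughUniqueChar_alt (s : String) : Bool :=
  let t := PySem.List.sorted s.toList (fun x => x) false
  let st := t.foldl
    (fun (st : Nat × Option Char) ch =>
      match st.2 with
      | none => (st.1 + 1, some ch)
      | some p => (if ch ≠ p then st.1 + 1 else st.1, some ch))
    (0, none)
  decide (2 * st.1 < s.toList.length)

-- ===== PRECONDITION & SPEC =====
def Spec_notEnoughUniqueChar (s : String) (out : Bool) : Prop := out = notEnoughUniqueChar_alt s
instance (s : String) (out : Bool) : Decidable (Spec_notEnoughUniqueChar s out) := by unfold Spec_notEnoughUniqueChar; infer_instance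

-- ===== CLAIM (what is proved, stated in full; the proofs are below) =====
def Claim_equal_notEnoughUniqueChar : Prop := ∀ (s : String), Dom_notEnoughUniqueChar s → Spec_notEnoughUniqueChar s (notEnoughUniqueChar s)

-- ===== LEMMAS AND PROOFS =====

-- card (insert b X) = 1 + card (X \ {b})
theorem card_insert_one_add_sdiff (b : Char) (X : Finset Char) :
    (insert b X).card = 1 + (X \ {b}).card := by
  rw [← Finset.erase_eq]
  by_cases h : b ∈ X
  · rw [Finset.card_insert_of_mem h, ← Finset.card_erase_add_one h, Nat.add_comm]
  · rw [Finset.card_insert_of_notMem h, Finset.erase_eq_of_notMem h, Nat.add_comm]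

-- A's fold builds a nodup list whose elements are acc's plus l's
theorem foldA_spec (l : List Char) : ∀ acc : List Char, acc.Nodup →
    (l.foldl (fun c ch => if ch ∈ c then c else c ++ [ch]) acc).Nodup ∧
    (l.foldl (fun c ch => if ch ∈ c then c else c ++ [ch]) acc).toFinset = acc.toFinset ∪ l.toFinset := by
  induction l with
  | nil => intro acc h; simpa using h
  | cons ch l ih =>
    intro acc h
    simp only [List.foldl_cons]
    by_cases hm : ch ∈ acc
    · simp only [if_pos hm]
      obtain ⟨h1, h2⟩ := ih acc h
      refine ⟨h1, ?_⟩
      rw [h2]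
      ext x
      simp only [Finset.mem_union, List.mem_toFinset, List.toFinset_cons, Finset.mem_insert]
      constructor
      · tauto
      · rintro (h | h | h) <;> first | exact Or.inl h | (subst h; exact Or.inl hm) | exact Or.inr h
    · simp only [if_neg hm]
      have hnd : (acc ++ [ch]).Nodup := by
        simp only [List.nodup_append, List.nodup_singleton, true_and]
        refine ⟨h, ?_⟩
        intro a ha b hb
        simp only [List.mem_singleton] at hb
        subst hb
        exact fun heq => hm (heq ▸ ha)
      obtain ⟨h1, h2⟩ := ih (acc ++ [ch]) hnd
      refine ⟨h1, ?_⟩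
      rw [h2]
      ext x
      simp only [Finset.mem_union, List.mem_toFinset, List.mem_append, List.mem_singleton,
        List.toFinset_cons, Finset.mem_insert]
      tauto

-- helper: pure boundary counter on a list, given the previous character
def countAdj (p : Char) : List Char → Nat
  | [] => 0
  | b :: r => (if b ≠ p then 1 else 0) + countAdj b r

-- B's fold, once started, computes k + countAdj p t in its first component
theorem foldB_eq_countAdj (t : List Char) : ∀ (k : Nat) (p : Char),
    (t.foldl
      (fun (st : Nat × Option Char) ch =>
        match st.2 with
        | none => (st.1 + 1, some ch)
        | some q => (if ch ≠ q then st.1 + 1 else st.1, some ch))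
      (k, some p)).1 = k + countAdj p t := by
  induction t with
  | nil => intro k p; simp [countAdj]
  | cons b r ih =>
    intro k p
    rw [List.foldl_cons]
    have hstep : (match ((k : Nat), some p).2 with
        | none => (((k : Nat), some p).1 + 1, some b)
        | some q => (if b ≠ q then ((k : Nat), some p).1 + 1 else ((k : Nat), some p).1, some b))
        = (((if b ≠ p then k + 1 else k) : Nat), some b) := rfl
    rw [hstep, ih]
    by_cases h : b = p <;> simp [countAdj, h] <;> omega

-- on a sorted tail whose elements all dominate p, boundary count = card of the elements ≠ p
theorem countAdj_card (t : List Char) : ∀ p : Char, t.Pairwise (· ≤ ·) → (∀ x ∈ t, p ≤ x) →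
    countAdj p t = (t.toFinset \ {p}).card := by
  induction t with
  | nil => intro p _ _; simp [countAdj]
  | cons b r ih =>
    intro p hp hleg
    have hbr : ∀ x ∈ r, b ≤ x := (List.pairwise_cons.mp hp).1
    have hr : r.Pairwise (· ≤ ·) := (List.pairwise_cons.mp hp).2
    by_cases h : b = p
    · subst h
      have : countAdj b (b :: r) = countAdj b r := by simp [countAdj]
      rw [this, ih b hr hbr]
      congr 1
      ext x
      simp only [List.toFinset_cons, Finset.mem_sdiff, Finset.mem_insert, List.mem_toFinset,
        Finset.mem_singleton]
      tauto
    · have hpb : p < b := lt_of_le_of_ne (hleg b (List.mem_cons_self)) (Ne.symm h)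
      have hpnot : p ∉ (b :: r) := by
        intro hmem
        rcases List.mem_cons.mp hmem with h1 | h1
        · exact absurd h1.symm h
        · exact absurd (hbr p h1) (not_le.mpr hpb)
      have : countAdj p (b :: r) = 1 + countAdj b r := by simp [countAdj, h]
      rw [this, ih b hr hbr]
      have hsd : ((b :: r).toFinset : Finset Char) \ {p} = (b :: r).toFinset := by
        apply Finset.sdiff_eq_self_of_disjoint
        simp only [Finset.disjoint_singleton_right, List.mem_toFinset]
        exact hpnot
      rw [hsd]
      have : ((b :: r).toFinset : Finset Char) = insert b r.toFinset := by simp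
      rw [this, card_insert_one_add_sdiff]

-- B's full fold from (0, none) counts the distinct characters of a sorted list
theorem foldB_card (t : List Char) (ht : t.Pairwise (· ≤ ·)) :
    (t.foldl
      (fun (st : Nat × Option Char) ch =>
        match st.2 with
        | none => (st.1 + 1, some ch)
        | some q => (if ch ≠ q then st.1 + 1 else st.1, some ch))
      (0, none)).1 = t.toFinset.card := by
  cases t with
  | nil => simp
  | cons b r =>
    have hbr : ∀ x ∈ r, b ≤ x := (List.pairwise_cons.mp ht).1
    have hr : r.Pairwise (· ≤ ·) := (List.pairwise_cons.mp ht).2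
    simp only [List.foldl_cons]
    rw [foldB_eq_countAdj, countAdj_card r b hr hbr]
    have : ((b :: r).toFinset : Finset Char) = insert b r.toFinset := by simp
    rw [this, card_insert_one_add_sdiff]

-- ===== VERDICT (by name: the statement is the Claim_ definition above) =====
theorem notEnoughUniqueChar_spec : Claim_equal_notEnoughUniqueChar := by
  intro s _
  unfold Spec_notEnoughUniqueChar notEnoughUniqueChar notEnoughUniqueChar_alt
  simp only []
  have hA : (s.toList.foldl (fun c ch => if ch ∈ c then c else c ++ [ch]) []).length
      = s.toList.toFinset.card := by
    obtain ⟨h1, h2⟩ := foldA_spec s.toList [] List.nodup_nil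
    rw [← List.toFinset_card_of_nodup h1, h2]
    simp
  have hperm : (PySem.List.sorted s.toList (fun x => x) false).Perm s.toList :=
    PySem.List.sorted_perm s.toList (fun x => x) false
  have hpw : (PySem.List.sorted s.toList (fun x => x) false).Pairwise (· ≤ ·) := by
    have := PySem.List.sorted_pairwise (xs := s.toList) (key := fun x => x)
    simpa using this
  have hB := foldB_card (PySem.List.sorted s.toList (fun x => x) false) hpw
  rw [hA, hB, List.toFinset_eq_of_perm _ _ hperm]
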